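-- pv_equiv track=rewrite | github.com/303webhouse/pandoras-box | backend/api/trade_ideas.py | _dedup_related_signals
-- ===== SOURCE A (Python) =====
-- SCAN_BASED_STRATEGIES = {"Holy_Grail", "Scout", "Phalanx", "holy_grail", "scout", "phalanx"}
--
-- def _dedup_related_signals(related: list) -> list:
--     """
--     Collapse duplicate signals from scan-based strategies within a time window.
--     Keeps only the most recent signal per (strategy, direction) combo.
--     Event-driven strategies pass through untouched.
--     """
--     if not related:
--         return related
--
--     keep = []
--     scan_buckets = {}  # key: strategy_lower -> newest signal dict
--
--     for sig in related:
--         strat = (sig.get("strategy") or "").strip()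
--         if strat in SCAN_BASED_STRATEGIES or strat.lower() in {s.lower() for s in SCAN_BASED_STRATEGIES}:
--             key = strat.lower()
--             existing = scan_buckets.get(key)
--             if existing is None:
--                 scan_buckets[key] = sig
--             else:
--                 # Keep whichever is newer
--                 sig_ts = str(sig.get("timestamp") or "")
--                 ex_ts = str(existing.get("timestamp") or "")
--                 if sig_ts > ex_ts:
--                     scan_buckets[key] = sig
--         else:
--             keep.append(sig)
--
--     # Add back one representative per scan-based strategy
--     keep.extend(scan_buckets.values())
--     return keep
-- ===== SOURCE B (Python) =====
-- SCAN_BASED_STRATEGIES = {"Holy_Grail", "Scout", "Phalanx", "holy_grail", "scout", "phalanx"}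
-- _SCAN_LOWER = {"holy_grail", "scout", "phalanx"}
--
--
-- def _key(sig):
--     return (sig.get("strategy") or "").strip().lower()
--
--
-- def _ts(sig):
--     return str(sig.get("timestamp") or "")
--
--
-- def _dedup_related_signals(related: list) -> list:
--     """Collapse duplicate scan-strategy signals, keeping the newest per strategy.
--
--     Staged passes, no dict: pass event-driven signals through with a filter, then
--     for each scan strategy (in order of first occurrence) rescan the list to pick
--     its strictly-newest signal (first occurrence wins ties, as in the original).
--     """
--     if not related:
--         return related
--
--     keep = [sig for sig in related if _key(sig) not in _SCAN_LOWER]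
--
--     done = []
--     reps = []
--     for sig in related:
--         k = _key(sig)
--         if k in _SCAN_LOWER and k not in done:
--             done.append(k)
--             best = sig
--             for other in related:
--                 if _key(other) == k and _ts(other) > _ts(best):
--                     best = other
--             reps.append(best)
--     return keep + reps
-- ===== Notes on version B (the rewrite author's own statement) =====
-- stated objective: alternative
-- what changed: A makes one online pass keeping a per-strategy bucket dict updated with the newer signal; B uses no dict at all: a filter passes event-driven signals through, then for each scan strategy in first-occurrence order it rescans the list to select its strictly-newest signal.
import Mathlib
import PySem

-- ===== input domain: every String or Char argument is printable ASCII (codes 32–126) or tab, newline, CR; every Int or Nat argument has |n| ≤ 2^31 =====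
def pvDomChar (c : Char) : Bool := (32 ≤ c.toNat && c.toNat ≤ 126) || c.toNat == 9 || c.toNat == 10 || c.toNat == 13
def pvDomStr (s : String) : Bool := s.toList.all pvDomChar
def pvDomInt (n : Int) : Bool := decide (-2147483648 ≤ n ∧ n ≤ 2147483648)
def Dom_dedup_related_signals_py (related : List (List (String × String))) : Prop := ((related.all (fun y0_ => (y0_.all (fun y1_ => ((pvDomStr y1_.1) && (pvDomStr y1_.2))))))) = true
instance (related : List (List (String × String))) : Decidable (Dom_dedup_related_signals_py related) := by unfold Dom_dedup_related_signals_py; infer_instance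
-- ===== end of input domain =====

-- B replaces A's single pass with an online per-strategy bucket dict by staged passes
-- without any dict: a filter for the event-driven signals, then for each scan strategy
-- (in first-occurrence order) a rescan of the list picking its strictly-newest signal
-- (objective: alternative decomposition); return values proved equal on all inputs.

-- ===== PORT A =====
-- shared accessors: sig.get("strategy" / "timestamp") with Python's `or ""` (a stored ""
-- is falsy and `or` yields "" as well, so the dict default is exact); str() of a str is itself.
def pvStrat (sig : List (String × String)) : String :=
  PySem.Str.strip ((PySem.Dict.mk sig).getD "strategy" "")

def pvTs (sig : List (String × String)) : List Char :=
  ((PySem.Dict.mk sig).getD "timestamp" "").toList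

def pvScanSet : List String :=
  PySem.Set.ofList ["Holy_Grail", "Scout", "Phalanx", "holy_grail", "scout", "phalanx"]

-- one iteration of A's for-loop: state = (keep, scan_buckets)
def pvStepA (st : List (List (String × String)) × PySem.Dict String (List (String × String)))
    (sig : List (String × String)) :
    List (List (String × String)) × PySem.Dict String (List (String × String)) :=
  -- strat := pvStrat sig; key := strat.lower()
  if pvScanSet.contains (pvStrat sig)
      || (PySem.Set.ofList (pvScanSet.map PySem.Str.lower)).contains (PySem.Str.lower (pvStrat sig)) then
    match st.2.get? (PySem.Str.lower (pvStrat sig)) with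
    | none => (st.1, st.2.insert (PySem.Str.lower (pvStrat sig)) sig)
    | some existing =>
        -- Python `sig_ts > ex_ts` on strings = lexicographic by code point
        if PySem.Chars.strLt (pvTs existing) (pvTs sig) then
          (st.1, st.2.insert (PySem.Str.lower (pvStrat sig)) sig)
        else st
  else (st.1 ++ [sig], st.2)

def dedup_related_signals_py (related : List (List (String × String))) : List (List (String × String)) :=
  if related.isEmpty then related
  else
    let st := related.foldl pvStepA ([], PySem.Dict.empty)
    st.1 ++ st.2.values

-- ===== PORT B =====
-- _key(sig) = (sig.get("strategy") or "").strip().lower()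
def bKey (sig : List (String × String)) : String :=
  PySem.Str.lower (PySem.Str.strip ((PySem.Dict.mk sig).getD "strategy" ""))

-- _ts(sig) = str(sig.get("timestamp") or "")
def bTs (sig : List (String × String)) : List Char :=
  ((PySem.Dict.mk sig).getD "timestamp" "").toList

def bScans : List String := ["holy_grail", "scout", "phalanx"]

-- B's inner rescan: best = sig; for other in related: if _key(other)==k and _ts(other)>_ts(best): best = other
def bBest (related : List (List (String × String))) (k : String)
    (sig : List (String × String)) : List (String × String) :=
  related.foldl
    (fun best other =>
      if bKey other == k && PySem.Chars.strLt (bTs best) (bTs other) then other else best) sig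

-- B's outer loop: state = (done, reps)
def bStep (related : List (List (String × String)))
    (st : List String × List (List (String × String))) (sig : List (String × String)) :
    List String × List (List (String × String)) :=
  if bScans.contains (bKey sig) && !st.1.contains (bKey sig) then
    (st.1 ++ [bKey sig], st.2 ++ [bBest related (bKey sig) sig])
  else st

def dedup_related_signals_py_alt (related : List (List (String × String))) : List (List (String × String)) :=
  if related.isEmpty then related
  else
    related.filter (fun sig => !bScans.contains (bKey sig))
      ++ (related.foldl (bStep related) ([], [])).2

-- ===== PRECONDITION & SPEC =====
def Spec_dedup_related_signals_py (related : List (List (String × String))) (out : List (List (String × String))) : Prop := out = dedup_related_signals_py_alt related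
instance (related : List (List (String × String))) (out : List (List (String × String))) : Decidable (Spec_dedup_related_signals_py related out) := by unfold Spec_dedup_related_signals_py; infer_instance

-- ===== CLAIM (what is proved, stated in full; the proofs are below) =====
def Claim_equal_dedup_related_signals_py : Prop := ∀ (related : List (List (String × String))), Dom_dedup_related_signals_py related → Spec_dedup_related_signals_py related (dedup_related_signals_py related)

-- ===== LEMMAS AND PROOFS =====

-- "this signal is scan-based" (B's test; proved equal to A's redundant double test below)
def pvScanb (sig : List (String × String)) : Bool := bScans.contains (bKey sig)

-- one step of A's bucket update at key k, seen as an Option value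
def pvSelStep (k : String) (acc : Option (List (String × String)))
    (sig : List (String × String)) : Option (List (String × String)) :=
  if pvScanb sig && (bKey sig == k) then
    match acc with
    | none => some sig
    | some b => if PySem.Chars.strLt (pvTs b) (pvTs sig) then some sig else some b
  else acc

-- A's running bucket value for key k after processing a prefix p
def pvSelA (p : List (List (String × String))) (k : String) : Option (List (String × String)) :=
  p.foldl (pvSelStep k) none

-- one step of the first-occurrence key order
def pvKOStep (ks : List String) (sig : List (String × String)) : List String :=
  if pvScanb sig && !ks.contains (bKey sig) then ks ++ [bKey sig] else ks

-- scan keys of p in order of first occurrence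
def pvKeyOrder (p : List (List (String × String))) : List String :=
  p.foldl pvKOStep []

lemma pv_cond_eq (s : String) :
    (pvScanSet.contains s
      || (PySem.Set.ofList (pvScanSet.map PySem.Str.lower)).contains (PySem.Str.lower s))
      = bScans.contains (PySem.Str.lower s) := by
  have hlow : (PySem.Set.ofList (pvScanSet.map PySem.Str.lower) : List String) = bScans := by decide
  rw [hlow]
  cases h : pvScanSet.contains s with
  | false => simp
  | true =>
    have hs : s = "Holy_Grail" ∨ s = "Scout" ∨ s = "Phalanx" ∨ s = "holy_grail"
        ∨ s = "scout" ∨ s = "phalanx" := by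
      have h6 : pvScanSet = ["Holy_Grail", "Scout", "Phalanx", "holy_grail", "scout", "phalanx"] := by
        decide
      rw [h6] at h
      simpa using h
    rcases hs with rfl | rfl | rfl | rfl | rfl | rfl <;> decide

lemma pv_strLt_irrefl (x : List Char) : PySem.Chars.strLt x x = false := by
  simp [PySem.Chars.strLt]

-- the key-order fold only appends, so membership persists
lemma pv_keyOrder_mono (l : List (List (String × String))) (a : List String) (y : String)
    (hy : y ∈ a) : y ∈ l.foldl pvKOStep a := by
  induction l generalizing a with
  | nil => simpa using hy
  | cons z zs ih =>
    rw [List.foldl_cons]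
    unfold pvKOStep
    split_ifs with hz
    · exact ih _ (List.mem_append_left _ hy)
    · exact ih _ hy

-- a key of a scan element of p appears in the key-order fold
lemma pv_keyOrder_aux (p : List (List (String × String))) (ks : List String)
    (sig : List (String × String)) (h1 : sig ∈ p) (h2 : pvScanb sig = true) :
    bKey sig ∈ p.foldl pvKOStep ks := by
  induction p generalizing ks with
  | nil => cases h1
  | cons x xs ih =>
    rw [List.foldl_cons]
    rcases List.mem_cons.mp h1 with h1 | h1
    · subst h1
      cases hk : ks.contains (bKey sig) with
      | true =>
        apply pv_keyOrder_mono
        unfold pvKOStep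
        split_ifs with hz
        · exact List.mem_append_left _ (by simpa using hk)
        · simpa using hk
      | false =>
        have hnm : bKey sig ∉ ks := by simpa using hk
        apply pv_keyOrder_mono
        unfold pvKOStep
        rw [if_pos (by simp [h2, hnm])]
        exact List.mem_append_right _ (List.mem_singleton.mpr rfl)
    · exact ih _ h1

lemma pv_keyOrder_of_mem (p : List (List (String × String))) (sig : List (String × String))
    (h1 : sig ∈ p) (h2 : pvScanb sig = true) : bKey sig ∈ pvKeyOrder p :=
  pv_keyOrder_aux p [] sig h1 h2

-- bKey t = k with k scan-based forces pvScanb t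
lemma pv_scanb_of_key (t : List (String × String)) (k : String)
    (hk : bScans.contains k = true) (ht : bKey t = k) : pvScanb t = true := by
  unfold pvScanb; rw [ht]; exact hk

-- pvSelA ignores elements whose key differs from k
lemma pv_selA_skip (p : List (List (String × String))) (k : String)
    (h : ∀ t ∈ p, bKey t ≠ k) (acc : Option (List (String × String))) :
    p.foldl (pvSelStep k) acc = acc := by
  induction p generalizing acc with
  | nil => rfl
  | cons x xs ih =>
    rw [List.foldl_cons]
    have hx : (bKey x == k) = false := by
      simpa using h x List.mem_cons_self
    unfold pvSelStep
    rw [if_neg (by simp [hx])]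
    exact ih (fun t ht => h t (List.mem_cons_of_mem _ ht)) acc

-- after the bucket holds b, A's remaining updates coincide with B's strictly-newer rescan
lemma pv_selA_agree (q : List (List (String × String))) (k : String)
    (hk : bScans.contains k = true) (b : List (String × String)) :
    q.foldl (pvSelStep k) (some b)
      = some (q.foldl
          (fun best other =>
            if bKey other == k && PySem.Chars.strLt (bTs best) (bTs other) then other else best) b) := by
  induction q generalizing b with
  | nil => rfl
  | cons x xs ih =>
    rw [List.foldl_cons, List.foldl_cons]
    unfold pvSelStep
    by_cases hx : bKey x = k
    · have hsb : pvScanb x = true := pv_scanb_of_key x k hk hx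
      have hbeq : (bKey x == k) = true := by simpa using hx
      rw [if_pos (by simp [hsb, hbeq])]
      by_cases hlt : PySem.Chars.strLt (pvTs b) (pvTs x) = true
      · rw [if_pos (by simp [hbeq]; exact hlt)]
        simp only [hlt, if_pos]
        exact ih x
      · have hlf : PySem.Chars.strLt (pvTs b) (pvTs x) = false := by
          simpa using hlt
        rw [if_neg (by simp [hbeq]; exact hlf)]
        simp only [hlf, Bool.false_eq_true, if_false]
        exact ih b
    · have hbeq : (bKey x == k) = false := by simpa using hx
      rw [if_neg (by simp [hbeq]), if_neg (by simp [hbeq])]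
      exact ih b

-- key lemma: if sig is the first element of related with key k (k scan-based),
-- then A's final bucket value at k is B's rescan result started from sig
lemma pv_selA_eq_bBest (p q : List (List (String × String))) (sig : List (String × String))
    (hk : bScans.contains (bKey sig) = true)
    (hp : ∀ t ∈ p, bKey t ≠ bKey sig) :
    pvSelA (p ++ sig :: q) (bKey sig) = some (bBest (p ++ sig :: q) (bKey sig) sig) := by
  unfold pvSelA bBest
  rw [List.foldl_append, List.foldl_append, List.foldl_cons, List.foldl_cons]
  rw [pv_selA_skip p (bKey sig) hp none]
  have hskipB : p.foldl
      (fun best other =>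
        if bKey other == bKey sig && PySem.Chars.strLt (bTs best) (bTs other) then other else best)
      sig = sig := by
    induction p with
    | nil => rfl
    | cons x xs ih =>
      rw [List.foldl_cons]
      have hx : (bKey x == bKey sig) = false := by
        simpa using hp x List.mem_cons_self
      rw [if_neg (by simp [hx])]
      exact ih (fun t ht => hp t (List.mem_cons_of_mem _ ht))
  rw [hskipB]
  have hsb : pvScanb sig = true := hk
  unfold pvSelStep
  rw [if_pos (by simp [hsb])]
  rw [if_neg (by simp [pv_strLt_irrefl (bTs sig)])]
  exact pv_selA_agree q (bKey sig) hk sig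

-- characterization of A's loop state over a prefix p
lemma pv_A_char (p : List (List (String × String))) :
    (p.foldl pvStepA ([], PySem.Dict.empty)).1 = p.filter (fun s => !pvScanb s)
      ∧ (p.foldl pvStepA ([], PySem.Dict.empty)).2.keys = pvKeyOrder p
      ∧ (p.foldl pvStepA ([], PySem.Dict.empty)).2.keys.Nodup
      ∧ ∀ k, (p.foldl pvStepA ([], PySem.Dict.empty)).2.get? k = pvSelA p k := by
  induction p using List.reverseRecOn with
  | nil => exact ⟨rfl, rfl, by simp, fun k => rfl⟩
  | append_singleton p s ih =>
    obtain ⟨h1, h2, h3, h4⟩ := ih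
    set st := p.foldl pvStepA ([], PySem.Dict.empty) with hst
    have hfold : (p ++ [s]).foldl pvStepA ([], PySem.Dict.empty) = pvStepA st s := by
      rw [List.foldl_append, List.foldl_cons, List.foldl_nil]
    have hkoFold : pvKeyOrder (p ++ [s]) = pvKOStep (pvKeyOrder p) s := by
      unfold pvKeyOrder; rw [List.foldl_append, List.foldl_cons, List.foldl_nil]
    have hselFold : ∀ k, pvSelA (p ++ [s]) k = pvSelStep k (pvSelA p k) s := by
      intro k; unfold pvSelA; rw [List.foldl_append, List.foldl_cons, List.foldl_nil]
    have hfilter : (p ++ [s]).filter (fun s => !pvScanb s)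
        = p.filter (fun s => !pvScanb s) ++ if pvScanb s then [] else [s] := by
      rw [List.filter_append]
      cases h : pvScanb s <;> simp [List.filter, h]
    rw [hfold]
    unfold pvStepA
    rw [pv_cond_eq]
    have hkeyeq : PySem.Str.lower (pvStrat s) = bKey s := rfl
    rw [hkeyeq]
    by_cases hsc : pvScanb s = true
    · have hscb : bScans.contains (bKey s) = true := hsc
      rw [if_pos hscb]
      cases hg : st.2.get? (bKey s) with
      | none =>
        have hnm : bKey s ∉ st.2.keys := (PySem.Dict.get?_eq_none_iff_not_mem_keys st.2 (bKey s)).1 hg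
        have hct : st.2.contains (bKey s) = false := (PySem.Dict.get?_eq_none_iff_contains st.2 (bKey s)).1 hg
        have hkonm : bKey s ∉ pvKeyOrder p := by rw [← h2]; exact hnm
        refine ⟨by simpa [hfilter, hsc] using h1, ?_, ?_, ?_⟩
        · rw [PySem.Dict.keys_insert_of_not_contains _ _ hct, hkoFold, h2]
          unfold pvKOStep
          rw [if_pos (by simp [hsc, hkonm])]
        · rw [PySem.Dict.keys_insert_of_not_contains _ _ hct]
          exact h3.append (List.nodup_singleton _) (List.disjoint_singleton.mpr hnm)
        · intro k
          rw [hselFold k, PySem.Dict.get?_insert]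
          unfold pvSelStep
          by_cases hks : k = bKey s
          · subst hks
            rw [if_pos rfl]
            have hnone : pvSelA p (bKey s) = none := by rw [← h4 (bKey s)]; exact hg
            simp [hsc, hnone]
          · rw [if_neg hks, h4 k]
            have : (bKey s == k) = false := by simpa using fun h => hks h.symm
            simp [this]
      | some ex =>
        have hmem : bKey s ∈ st.2.keys := by
          by_contra hmm
          rw [(PySem.Dict.get?_eq_none_iff_not_mem_keys st.2 (bKey s)).2 hmm] at hg
          cases hg
        have hct : st.2.contains (bKey s) = true := by
          cases hc' : st.2.contains (bKey s)
          · rw [(PySem.Dict.get?_eq_none_iff_contains st.2 (bKey s)).2 hc'] at hg; cases hg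
          · rfl
        have hkoct : bKey s ∈ pvKeyOrder p := by rw [← h2]; exact hmem
        have hkoEq : pvKeyOrder (p ++ [s]) = pvKeyOrder p := by
          rw [hkoFold]
          unfold pvKOStep
          rw [if_neg (by simp [hkoct])]
        dsimp only
        by_cases hlt : PySem.Chars.strLt (pvTs ex) (pvTs s) = true
        · rw [if_pos hlt]
          refine ⟨by simpa [hfilter, hsc] using h1, ?_, ?_, ?_⟩
          · rw [PySem.Dict.keys_insert_of_contains _ _ hct, h2, hkoEq]
          · rw [PySem.Dict.keys_insert_of_contains _ _ hct]; exact h3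
          · intro k
            rw [hselFold k, PySem.Dict.get?_insert]
            unfold pvSelStep
            by_cases hks : k = bKey s
            · subst hks
              rw [if_pos rfl]
              have hsome : pvSelA p (bKey s) = some ex := by rw [← h4 (bKey s)]; exact hg
              simp [hsc, hsome, hlt]
            · rw [if_neg hks, h4 k]
              have : (bKey s == k) = false := by simpa using fun h => hks h.symm
              simp [this]
        · have hlf : PySem.Chars.strLt (pvTs ex) (pvTs s) = false := by simpa using hlt
          rw [if_neg (by simp [hlf])]
          refine ⟨by simpa [hfilter, hsc] using h1, by rw [h2, hkoEq], h3, ?_⟩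
          intro k
          rw [hselFold k, h4 k]
          unfold pvSelStep
          by_cases hks : k = bKey s
          · subst hks
            have hsome : pvSelA p (bKey s) = some ex := by rw [← h4 (bKey s)]; exact hg
            simp [hsc, hsome, hlf]
          · have : (bKey s == k) = false := by simpa using fun h => hks h.symm
            simp [this]
    · have hscf : pvScanb s = false := by simpa using hsc
      have hscb : bScans.contains (bKey s) = false := hscf
      rw [if_neg (by rw [hscb]; simp)]
      refine ⟨?_, ?_, h3, ?_⟩
      · rw [hfilter, hscf, h1]; simp
      · rw [hkoFold, h2]
        unfold pvKOStep
        rw [if_neg (by simp [hscf])]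
      · intro k
        rw [hselFold k, h4 k]
        unfold pvSelStep
        rw [if_neg (by simp [hscf])]

-- characterization of B's outer loop: reps lists, per scan key in first-occurrence
-- order, A's final bucket value (= B's rescan result, by pv_selA_eq_bBest)
lemma pv_B_char (related : List (List (String × String))) :
    ∀ q p, related = p ++ q →
      q.foldl (bStep related)
        (pvKeyOrder p, (pvKeyOrder p).map (fun k => (pvSelA related k).getD []))
      = (pvKeyOrder related, (pvKeyOrder related).map (fun k => (pvSelA related k).getD [])) := by
  intro q
  induction q with
  | nil =>
    intro p hp
    simp only [List.append_nil] at hp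
    subst hp
    rfl
  | cons s q' ih =>
    intro p hp
    rw [List.foldl_cons]
    have hkoFold : pvKeyOrder (p ++ [s]) = pvKOStep (pvKeyOrder p) s := by
      unfold pvKeyOrder; rw [List.foldl_append, List.foldl_cons, List.foldl_nil]
    have hp' : related = (p ++ [s]) ++ q' := by rw [hp]; simp
    by_cases hc : (bScans.contains (bKey s) && !(pvKeyOrder p).contains (bKey s)) = true
    · have hsc : bScans.contains (bKey s) = true := by
        cases h' : bScans.contains (bKey s)
        · rw [h'] at hc; simp at hc
        · rfl
      have hnc : (pvKeyOrder p).contains (bKey s) = false := by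
        cases h' : (pvKeyOrder p).contains (bKey s)
        · rfl
        · rw [h'] at hc; simp at hc
      -- no earlier element of p carries key (bKey s)
      have hpfree : ∀ t ∈ p, bKey t ≠ bKey s := by
        intro t ht heq
        have hscan_t : pvScanb t = true := pv_scanb_of_key t (bKey s) hsc heq
        have hmem : bKey t ∈ pvKeyOrder p := pv_keyOrder_of_mem p t ht hscan_t
        rw [heq] at hmem
        rw [List.contains_eq_mem] at hnc
        simp [hmem] at hnc
      have hval : (pvSelA related (bKey s)).getD [] = bBest related (bKey s) s := by
        rw [hp, pv_selA_eq_bBest p q' s hsc hpfree]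
        rfl
      have hstep : bStep related
          (pvKeyOrder p, (pvKeyOrder p).map (fun k => (pvSelA related k).getD [])) s
          = (pvKeyOrder (p ++ [s]),
             (pvKeyOrder (p ++ [s])).map (fun k => (pvSelA related k).getD [])) := by
        unfold bStep
        rw [if_pos hc, hkoFold]
        unfold pvKOStep
        have hcb : (pvScanb s && !(pvKeyOrder p).contains (bKey s)) = true := hc
        rw [if_pos hcb]
        simp [hval]
      rw [hstep]
      exact ih (p ++ [s]) hp'
    · have hkoEq : pvKeyOrder (p ++ [s]) = pvKeyOrder p := by
        rw [hkoFold]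
        unfold pvKOStep
        rw [if_neg (show ¬(pvScanb s && !(pvKeyOrder p).contains (bKey s)) = true from fun h => hc h)]
      have hstep : bStep related
          (pvKeyOrder p, (pvKeyOrder p).map (fun k => (pvSelA related k).getD [])) s
          = (pvKeyOrder p, (pvKeyOrder p).map (fun k => (pvSelA related k).getD [])) := by
        unfold bStep
        rw [if_neg hc]
      rw [hstep]
      have := ih (p ++ [s]) hp'
      rw [hkoEq] at this
      exact this

-- ===== VERDICT (by name: the statement is the Claim_ definition above) =====
theorem dedup_related_signals_py_spec : Claim_equal_dedup_related_signals_py := by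
  intro related _
  unfold Spec_dedup_related_signals_py dedup_related_signals_py dedup_related_signals_py_alt
  by_cases he : related.isEmpty
  · simp [he]
  · simp only [he, Bool.false_eq_true, if_false]
    obtain ⟨h1, h2, h3, h4⟩ := pv_A_char related
    have hB := pv_B_char related related [] rfl
    have hB2 : (related.foldl (bStep related) ([], [])).2
        = (pvKeyOrder related).map (fun k => (pvSelA related k).getD []) := by
      rw [show (([], []) : List String × List (List (String × String)))
            = (pvKeyOrder [], (pvKeyOrder []).map (fun k => (pvSelA related k).getD [])) from rfl,
          hB]
    have hvals : (related.foldl pvStepA ([], PySem.Dict.empty)).2.values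
        = (pvKeyOrder related).map (fun k => (pvSelA related k).getD []) := by
      rw [PySem.Dict.values_eq_map_keys _ h3 [], h2]
      apply List.map_congr_left
      intro k _
      rw [PySem.Dict.getD_eq_get?_getD, h4 k]
    rw [h1, hvals, hB2]
    rfl
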